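-- pv_equiv track=rewrite | github.com/Ascend-Research/AutoGO | gen_vocab.py | find_in_nodes
-- ===== SOURCE A (Python) =====
-- def find_in_nodes(cg_edges, ng):
--     in_nodes = []
--     num_inputs = 0
--     for node in ng:
--         flag_firstNode = True
--         for edge in cg_edges:
--             if edge[1] == node:
--                 flag_firstNode = False
--                 if edge[0] not in ng and edge[0] not in in_nodes:
--                     num_inputs += 1
--                     if node not in in_nodes:
--                         in_nodes.append(node)
--         if flag_firstNode:
--             in_nodes.append(node)
--     return in_nodes, num_inputs
-- ===== SOURCE B (Python) =====
-- def find_in_nodes(cg_edges, ng):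
--     # One pass over the edges builds per-node tables; then one pass over ng.
--     if not ng:
--         return [], 0
--     ngset = set(ng)
--     has_incoming = set()
--     ext_count = {}
--     for edge in cg_edges:
--         t = edge[1]
--         if t in ngset:
--             has_incoming.add(t)
--             if edge[0] not in ngset:
--                 ext_count[t] = ext_count.get(t, 0) + 1
--     in_nodes = []
--     seen = set()
--     num_inputs = 0
--     for node in ng:
--         num_inputs += ext_count.get(node, 0)
--         if node not in has_incoming:
--             in_nodes.append(node)
--         elif ext_count.get(node, 0) > 0 and node not in seen:
--             in_nodes.append(node)
--             seen.add(node)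
--     return in_nodes, num_inputs
-- ===== Notes on version B (the rewrite author's own statement) =====
-- stated objective: faster
-- what changed: A rescans the whole edge list for every node of ng with list-membership tests; B makes one pass over the edges building a has_incoming set and an external-in-edge counter keyed by target, then a single pass over ng.
import Mathlib
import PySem

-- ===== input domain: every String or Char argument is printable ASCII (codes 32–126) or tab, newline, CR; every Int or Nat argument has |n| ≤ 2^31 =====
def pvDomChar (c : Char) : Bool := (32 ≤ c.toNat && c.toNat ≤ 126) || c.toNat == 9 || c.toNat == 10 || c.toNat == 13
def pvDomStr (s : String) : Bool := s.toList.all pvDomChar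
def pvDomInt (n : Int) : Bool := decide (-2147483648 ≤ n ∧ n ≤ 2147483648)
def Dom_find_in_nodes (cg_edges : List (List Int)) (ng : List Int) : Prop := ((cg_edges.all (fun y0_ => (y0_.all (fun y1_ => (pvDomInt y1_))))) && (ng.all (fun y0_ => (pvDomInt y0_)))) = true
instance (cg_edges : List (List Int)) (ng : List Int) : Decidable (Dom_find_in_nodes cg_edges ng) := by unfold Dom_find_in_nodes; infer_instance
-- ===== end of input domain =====

-- B replaces A's per-node rescan of the whole edge list by one pass over the edges building a
-- has-incoming set and an external-in-edge counter, then a single pass over ng (objective: faster).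

-- edge[1] / edge[0]; the getD 0 default is only reached outside Pre_ (where Python raises IndexError)
def pvTgt (e : List Int) : Int := (PySem.List.pyGet? e 1).getD 0
def pvSrc (e : List Int) : Int := (PySem.List.pyGet? e 0).getD 0

-- ===== PORT A =====
def pvAInner (ng : List Int) (node : Int) (s : List Int × Int × Bool) (edge : List Int) : List Int × Int × Bool :=
  if pvTgt edge == node then
    let s := (s.1, s.2.1, false)
    if !(ng.contains (pvSrc edge)) && !(s.1.contains (pvSrc edge)) then
      if !(s.1.contains node) then (s.1 ++ [node], s.2.1 + 1, s.2.2)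
      else (s.1, s.2.1 + 1, s.2.2)
    else s
  else s

def pvAOuter (cg_edges : List (List Int)) (ng : List Int) (st : List Int × Int) (node : Int) : List Int × Int :=
  let s := cg_edges.foldl (pvAInner ng node) (st.1, st.2, true)
  if s.2.2 then (s.1 ++ [node], s.2.1) else (s.1, s.2.1)

def find_in_nodes (cg_edges : List (List Int)) (ng : List Int) : List Int × Int :=
  ng.foldl (pvAOuter cg_edges ng) (([] : List Int), (0 : Int))

-- ===== PORT B =====
def pvBTab (ngset : PySem.Set Int) (st : PySem.Set Int × PySem.Dict Int Int) (edge : List Int) :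
    PySem.Set Int × PySem.Dict Int Int :=
  let t := pvTgt edge
  if PySem.Set.contains ngset t then
    let hi := PySem.Set.add st.1 t
    if !(PySem.Set.contains ngset (pvSrc edge)) then (hi, st.2.insert t (st.2.getD t 0 + 1))
    else (hi, st.2)
  else st

def pvBAcc (hi : PySem.Set Int) (ec : PySem.Dict Int Int) (r : List Int × Int × PySem.Set Int) (node : Int) :
    List Int × Int × PySem.Set Int :=
  let num := r.2.1 + ec.getD node 0
  if !(PySem.Set.contains hi node) then (r.1 ++ [node], num, r.2.2)
  else if 0 < ec.getD node 0 ∧ !(PySem.Set.contains r.2.2 node) then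
    (r.1 ++ [node], num, PySem.Set.add r.2.2 node)
  else (r.1, num, r.2.2)

def find_in_nodes_alt (cg_edges : List (List Int)) (ng : List Int) : List Int × Int :=
  if ng = [] then ([], 0)
  else
    let ngset : PySem.Set Int := PySem.Set.ofList ng
    let tabs := cg_edges.foldl (pvBTab ngset) (PySem.Set.empty, PySem.Dict.empty)
    let fin := ng.foldl (pvBAcc tabs.1 tabs.2) (([] : List Int), (0 : Int), PySem.Set.empty)
    (fin.1, fin.2.1)

-- ===== PRECONDITION & SPEC =====
-- Python A raises IndexError indexing edge[1]/edge[0] when ng is nonempty and some edge has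
-- fewer than 2 entries; Pre_ excludes exactly those inputs (with ng empty no edge is indexed).
def Pre_find_in_nodes (cg_edges : List (List Int)) (ng : List Int) : Prop :=
  ng = [] ∨ ∀ e ∈ cg_edges, 2 ≤ e.length
instance (cg_edges : List (List Int)) (ng : List Int) : Decidable (Pre_find_in_nodes cg_edges ng) := by
  unfold Pre_find_in_nodes; infer_instance

def pvWitness_find_in_nodes : List (List Int) × List Int := ([[0, 1], [1, 2]], [1, 2])

def Spec_find_in_nodes (cg_edges : List (List Int)) (ng : List Int) (out : List Int × Int) : Prop := out = find_in_nodes_alt cg_edges ng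
instance (cg_edges : List (List Int)) (ng : List Int) (out : List Int × Int) : Decidable (Spec_find_in_nodes cg_edges ng out) := by unfold Spec_find_in_nodes; infer_instance

-- ===== CLAIM (what is proved, stated in full; the proofs are below) =====
def Claim_equal_find_in_nodes : Prop := ∀ (cg_edges : List (List Int)) (ng : List Int), Dom_find_in_nodes cg_edges ng → Pre_find_in_nodes cg_edges ng → Spec_find_in_nodes cg_edges ng (find_in_nodes cg_edges ng)

-- ===== LEMMAS AND PROOFS =====

-- abstract values both loops compute per node value: has an incoming edge / count of
-- in-edges from outside ng
def pvHasInc (cg_edges : List (List Int)) (x : Int) : Bool :=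
  cg_edges.any (fun e => pvTgt e == x)

def pvExt (cg_edges : List (List Int)) (ng : List Int) (x : Int) : Int :=
  (cg_edges.countP (fun e => pvTgt e == x && !(ng.contains (pvSrc e))) : Int)

theorem pvContains_eq (l : List Int) (x : Int) : l.contains x = decide (x ∈ l) := by
  by_cases h : x ∈ l <;> simp [h]

theorem pvSContains_eq (s : PySem.Set Int) (x : Int) : PySem.Set.contains s x = decide (x ∈ s) := by
  rw [PySem.Set.contains_eq_listContains]; exact pvContains_eq s x

theorem pvContains_add (s : PySem.Set Int) (t x : Int) :
    PySem.Set.contains (PySem.Set.add s t) x = (PySem.Set.contains s x || x == t) := by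
  rw [pvSContains_eq, pvSContains_eq]
  by_cases h : x ∈ s <;> by_cases h2 : x = t <;>
    simp [PySem.Set.mem_add, h, h2]

theorem pvContains_ofList (ng : List Int) (x : Int) :
    PySem.Set.contains (PySem.Set.ofList ng) x = ng.contains x := by
  rw [pvSContains_eq, pvContains_eq]
  by_cases h : x ∈ ng <;> simp [PySem.Set.mem_ofList, h]

theorem pvExt_nonneg (cg_edges : List (List Int)) (ng : List Int) (x : Int) :
    0 ≤ pvExt cg_edges ng x := by unfold pvExt; positivity

theorem pvExt_eq_zero_of_not_hasInc (cg_edges : List (List Int)) (ng : List Int) (x : Int)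
    (h : pvHasInc cg_edges x = false) : pvExt cg_edges ng x = 0 := by
  unfold pvExt
  have : cg_edges.countP (fun e => pvTgt e == x && !(ng.contains (pvSrc e))) = 0 := by
    rw [List.countP_eq_zero]
    intro e he
    simp only [pvHasInc, List.any_eq_false] at h
    have hf := h e he
    simp only [Bool.not_eq_true] at hf
    simp [hf]
  exact_mod_cast this

theorem pvExt_cons (e : List Int) (rest : List (List Int)) (ng : List Int) (x : Int) :
    pvExt (e :: rest) ng x
      = (if pvTgt e = x ∧ pvSrc e ∉ ng then 1 else 0) + pvExt rest ng x := by
  simp only [pvExt, List.countP_cons]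
  by_cases h1 : pvTgt e = x <;> by_cases h2 : pvSrc e ∈ ng <;>
    simp [h1, h2] <;> omega

theorem pvHasInc_cons (e : List Int) (rest : List (List Int)) (x : Int) :
    pvHasInc (e :: rest) x = ((pvTgt e == x) || pvHasInc rest x) := by
  simp [pvHasInc]

theorem pvAInner_fold (ng : List Int) (node : Int) (hnode : node ∈ ng) :
    ∀ (edges : List (List Int)) (inn : List Int) (num : Int) (flag : Bool),
      (∀ y ∈ inn, y ∈ ng) →
      edges.foldl (pvAInner ng node) (inn, num, flag) =
        (if 0 < pvExt edges ng node ∧ inn.contains node = false then inn ++ [node] else inn,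
         num + pvExt edges ng node,
         flag && !(pvHasInc edges node)) := by
  intro edges
  induction edges with
  | nil =>
      intro inn num flag _
      simp [pvExt, pvHasInc]
  | cons e rest ih =>
      intro inn num flag hsub
      have hstep : List.foldl (pvAInner ng node) (inn, num, flag) (e :: rest)
          = List.foldl (pvAInner ng node) (pvAInner ng node (inn, num, flag) e) rest := rfl
      by_cases h1 : pvTgt e = node
      · by_cases h2 : pvSrc e ∈ ng
        · have hA : pvAInner ng node (inn, num, flag) e = (inn, num, false) := by
            simp [pvAInner, h1, h2]
          rw [hstep, hA, ih inn num false hsub]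
          have he : pvExt (e :: rest) ng node = pvExt rest ng node := by
            simp [pvExt, List.countP_cons, h2]
          have hh : pvHasInc (e :: rest) node = true := by simp [pvHasInc, h1]
          simp [he, hh]
        · have hsrc : pvSrc e ∉ inn := fun h => h2 (hsub _ h)
          have he : pvExt (e :: rest) ng node = pvExt rest ng node + 1 := by
            simp [pvExt, List.countP_cons, h1, h2]
          have hh : pvHasInc (e :: rest) node = true := by simp [pvHasInc, h1]
          by_cases h3 : node ∈ inn
          · have hA : pvAInner ng node (inn, num, flag) e = (inn, num + 1, false) := by
              simp [pvAInner, h1, h2, hsrc, h3]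
            rw [hstep, hA, ih inn (num + 1) false hsub]
            simp [he, hh, h3]
            omega
          · have hA : pvAInner ng node (inn, num, flag) e = (inn ++ [node], num + 1, false) := by
              simp [pvAInner, h1, h2, hsrc, h3]
            have hsub' : ∀ y ∈ inn ++ [node], y ∈ ng := by
              intro y hy
              rcases List.mem_append.1 hy with h | h
              · exact hsub y h
              · simp at h; simpa [h] using hnode
            rw [hstep, hA, ih (inn ++ [node]) (num + 1) false hsub']
            have hpos : 0 < pvExt rest ng node + 1 := by
              have := pvExt_nonneg rest ng node; omega
            simp [he, hh, h3, hpos]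
            omega
      · have hA : pvAInner ng node (inn, num, flag) e = (inn, num, flag) := by
          simp [pvAInner, h1]
        rw [hstep, hA, ih inn num flag hsub]
        have he : pvExt (e :: rest) ng node = pvExt rest ng node := by
          simp [pvExt, List.countP_cons, h1]
        have hh : pvHasInc (e :: rest) node = pvHasInc rest node := by
          simp [pvHasInc, h1]
        simp [he, hh]

theorem pvBTab_fold_contains (ng : List Int) :
    ∀ (edges : List (List Int)) (hi : PySem.Set Int) (ec : PySem.Dict Int Int) (x : Int),
      PySem.Set.contains (edges.foldl (pvBTab (PySem.Set.ofList ng)) (hi, ec)).1 x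
        = (PySem.Set.contains hi x || (ng.contains x && pvHasInc edges x)) := by
  intro edges
  induction edges with
  | nil => intro hi ec x; simp [pvHasInc]
  | cons e rest ih =>
      intro hi ec x
      have hstep : ∀ st, List.foldl (pvBTab (PySem.Set.ofList ng)) st (e :: rest)
          = List.foldl (pvBTab (PySem.Set.ofList ng)) (pvBTab (PySem.Set.ofList ng) st e) rest :=
        fun _ => rfl
      rw [hstep]
      by_cases h1 : pvTgt e ∈ ng
      · have hB2 : pvBTab (PySem.Set.ofList ng) (hi, ec) e
            = (PySem.Set.add hi (pvTgt e), (pvBTab (PySem.Set.ofList ng) (hi, ec) e).2) := by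
          by_cases h2 : pvSrc e ∈ ng <;>
            simp [pvBTab, pvContains_ofList, pvContains_eq, h1, h2]
        rw [hB2, ih, pvContains_add, pvHasInc_cons]
        by_cases hx : x = pvTgt e
        · rw [pvSContains_eq, pvContains_eq]
          simp [hx, h1]
        · have hbx : (x == pvTgt e) = false := by simpa using hx
          have hbx' : (pvTgt e == x) = false := by simpa using (Ne.symm hx)
          simp [hbx, hbx']
      · have hB : pvBTab (PySem.Set.ofList ng) (hi, ec) e = (hi, ec) := by
          simp [pvBTab, pvContains_ofList, pvContains_eq, h1]
        rw [hB, ih, pvHasInc_cons]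
        by_cases hx : x = pvTgt e
        · have h1x : x ∉ ng := by rw [hx]; exact h1
          rw [pvContains_eq]
          simp [h1x]
        · have hbx' : (pvTgt e == x) = false := by simpa using (Ne.symm hx)
          simp [hbx']

theorem pvBTab_fold_getD (ng : List Int) :
    ∀ (edges : List (List Int)) (hi : PySem.Set Int) (ec : PySem.Dict Int Int) (x : Int),
      x ∈ ng →
      ((edges.foldl (pvBTab (PySem.Set.ofList ng)) (hi, ec)).2).getD x 0
        = ec.getD x 0 + pvExt edges ng x := by
  intro edges
  induction edges with
  | nil => intro hi ec x _; simp [pvExt]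
  | cons e rest ih =>
      intro hi ec x hx
      have hstep : ∀ st, List.foldl (pvBTab (PySem.Set.ofList ng)) st (e :: rest)
          = List.foldl (pvBTab (PySem.Set.ofList ng)) (pvBTab (PySem.Set.ofList ng) st e) rest :=
        fun _ => rfl
      rw [hstep]
      by_cases h1 : pvTgt e ∈ ng
      · by_cases h2 : pvSrc e ∈ ng
        · have hB : pvBTab (PySem.Set.ofList ng) (hi, ec) e = (PySem.Set.add hi (pvTgt e), ec) := by
            simp [pvBTab, pvContains_ofList, pvContains_eq, h1, h2]
          rw [hB, ih _ _ _ hx, pvExt_cons]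
          simp [h2]
        · have hB : pvBTab (PySem.Set.ofList ng) (hi, ec) e
              = (PySem.Set.add hi (pvTgt e), ec.insert (pvTgt e) (ec.getD (pvTgt e) 0 + 1)) := by
            simp [pvBTab, pvContains_ofList, pvContains_eq, h1, h2]
          rw [hB, ih _ _ _ hx, PySem.Dict.getD_insert, pvExt_cons]
          by_cases hxt : x = pvTgt e
          · simp [hxt, h2]
            omega
          · simp [hxt, Ne.symm hxt]
      · have hB : pvBTab (PySem.Set.ofList ng) (hi, ec) e = (hi, ec) := by
          simp [pvBTab, pvContains_ofList, pvContains_eq, h1]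
        have hne : pvTgt e ≠ x := fun h => h1 (h ▸ hx)
        rw [hB, ih _ _ _ hx, pvExt_cons]
        simp [hne]

theorem pvZip (cg_edges : List (List Int)) (ng : List Int)
    (HI : PySem.Set Int) (EC : PySem.Dict Int Int)
    (hHI : ∀ x, PySem.Set.contains HI x = (ng.contains x && pvHasInc cg_edges x))
    (hEC : ∀ x, x ∈ ng → EC.getD x 0 = pvExt cg_edges ng x) :
    ∀ (l : List Int), (∀ y ∈ l, y ∈ ng) →
      ∀ (inn : List Int) (num : Int) (seen : PySem.Set Int),
        (∀ y ∈ inn, y ∈ ng) →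
        (∀ x, PySem.Set.contains seen x = (inn.contains x && pvHasInc cg_edges x)) →
        l.foldl (pvAOuter cg_edges ng) (inn, num)
          = ((l.foldl (pvBAcc HI EC) (inn, num, seen)).1,
             (l.foldl (pvBAcc HI EC) (inn, num, seen)).2.1) := by
  intro l
  induction l with
  | nil => intro _ inn num seen _ _; rfl
  | cons node rest ih =>
      intro hl inn num seen hsub hseen
      have hnode : node ∈ ng := hl node (by simp)
      have hngc : (ng.contains node) = true := by rw [pvContains_eq]; simp [hnode]
      have hl' : ∀ y ∈ rest, y ∈ ng := fun y hy => hl y (by simp [hy])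
      have hstepA : ∀ st, List.foldl (pvAOuter cg_edges ng) st (node :: rest)
          = List.foldl (pvAOuter cg_edges ng) (pvAOuter cg_edges ng st node) rest := fun _ => rfl
      have hstepB : ∀ st, List.foldl (pvBAcc HI EC) st (node :: rest)
          = List.foldl (pvBAcc HI EC) (pvBAcc HI EC st node) rest := fun _ => rfl
      rw [hstepA, hstepB]
      have hsub1 : ∀ y ∈ inn ++ [node], y ∈ ng := by
        intro y hy
        rcases List.mem_append.1 hy with h | h
        · exact hsub y h
        · simp at h; simpa [h] using hnode
      have hA : pvAOuter cg_edges ng (inn, num) node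
          = (if pvHasInc cg_edges node then
               (if 0 < pvExt cg_edges ng node ∧ inn.contains node = false then inn ++ [node] else inn,
                num + pvExt cg_edges ng node)
             else (inn ++ [node], num)) := by
        unfold pvAOuter
        rw [pvAInner_fold ng node hnode cg_edges inn num true hsub]
        by_cases hh : pvHasInc cg_edges node
        · simp [hh]
        · have hh' : pvHasInc cg_edges node = false := by simpa using hh
          have hz := pvExt_eq_zero_of_not_hasInc cg_edges ng node hh'
          simp [hh', hz]
      by_cases hh : pvHasInc cg_edges node
      · have hHIc : PySem.Set.contains HI node = true := by rw [hHI node, hngc, hh]; rfl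
        by_cases hpos : 0 < pvExt cg_edges ng node
        · by_cases hin : node ∈ inn
          · have hin' : (inn.contains node) = true := by rw [pvContains_eq]; simp [hin]
            have hseenc : PySem.Set.contains seen node = true := by
              rw [hseen node, hin', hh]; rfl
            have hmHI : node ∈ HI := (PySem.Set.contains_iff _ _).mp hHIc
            have hmseen : node ∈ seen := (PySem.Set.contains_iff _ _).mp hseenc
            have hB : pvBAcc HI EC (inn, num, seen) node
                = (inn, num + pvExt cg_edges ng node, seen) := by
              simp [pvBAcc, hmHI, hmseen, hEC node hnode]
            rw [hA, hB]
            simp only [hh, if_true, hin', Bool.true_eq_false, and_false, if_false]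
            exact ih hl' inn (num + pvExt cg_edges ng node) seen hsub hseen
          · have hin' : (inn.contains node) = false := by rw [pvContains_eq]; simp [hin]
            have hseenc : PySem.Set.contains seen node = false := by
              rw [hseen node, hin']; simp
            have hmHI : node ∈ HI := (PySem.Set.contains_iff _ _).mp hHIc
            have hmseen : node ∉ seen := fun h => by
              rw [(PySem.Set.contains_iff _ _).mpr h] at hseenc; cases hseenc
            have hB : pvBAcc HI EC (inn, num, seen) node
                = (inn ++ [node], num + pvExt cg_edges ng node, PySem.Set.add seen node) := by
              simp [pvBAcc, hmHI, hmseen, hEC node hnode, hpos]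
            rw [hA, hB]
            simp only [hh, if_true, hin', hpos, and_true, if_true]
            have hseen' : ∀ x, PySem.Set.contains (PySem.Set.add seen node) x
                = ((inn ++ [node]).contains x && pvHasInc cg_edges x) := by
              intro x
              rw [pvContains_add, hseen x, pvContains_eq, pvContains_eq]
              by_cases hx : x = node
              · subst hx; simp [hh]
              · simp [hx]
            exact ih hl' (inn ++ [node]) (num + pvExt cg_edges ng node) (PySem.Set.add seen node) hsub1 hseen'
        · have hECz : EC.getD node 0 = pvExt cg_edges ng node := hEC node hnode
          have hmHI : node ∈ HI := (PySem.Set.contains_iff _ _).mp hHIc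
          have hB : pvBAcc HI EC (inn, num, seen) node
              = (inn, num + pvExt cg_edges ng node, seen) := by
            simp [pvBAcc, hmHI, hECz, hpos]
          rw [hA, hB]
          simp only [hh, if_true]
          rw [if_neg (by intro h; exact hpos h.1)]
          exact ih hl' inn (num + pvExt cg_edges ng node) seen hsub hseen
      · have hh' : pvHasInc cg_edges node = false := by simpa using hh
        have hHIc : PySem.Set.contains HI node = false := by rw [hHI node, hh']; simp
        have hmHI : node ∉ HI := fun h => by
          rw [(PySem.Set.contains_iff _ _).mpr h] at hHIc; cases hHIc
        have hB : pvBAcc HI EC (inn, num, seen) node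
            = (inn ++ [node], num + EC.getD node 0, seen) := by
          simp [pvBAcc, hmHI]
        have hz := pvExt_eq_zero_of_not_hasInc cg_edges ng node hh'
        have hECz : EC.getD node 0 = 0 := by rw [hEC node hnode, hz]
        rw [hA, hB]
        simp only [hh', Bool.false_eq_true, if_false, hECz, add_zero]
        have hseen' : ∀ x, PySem.Set.contains seen x
            = ((inn ++ [node]).contains x && pvHasInc cg_edges x) := by
          intro x
          rw [hseen x, pvContains_eq, pvContains_eq]
          by_cases hx : x = node
          · subst hx; simp [hh']
          · simp [hx]
        exact ih hl' (inn ++ [node]) num seen hsub1 hseen'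

theorem pvMain (cg_edges : List (List Int)) (ng : List Int) :
    find_in_nodes cg_edges ng = find_in_nodes_alt cg_edges ng := by
  unfold find_in_nodes find_in_nodes_alt
  by_cases hng : ng = []
  · subst hng; rfl
  · rw [if_neg hng]
    have hHI' : ∀ x, PySem.Set.contains
        (cg_edges.foldl (pvBTab (PySem.Set.ofList ng)) (PySem.Set.empty, PySem.Dict.empty)).1 x
        = (ng.contains x && pvHasInc cg_edges x) := by
      intro x
      rw [pvBTab_fold_contains ng cg_edges PySem.Set.empty PySem.Dict.empty x, pvSContains_eq]
      simp [PySem.Set.empty]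
    have hEC' : ∀ x, x ∈ ng →
        ((cg_edges.foldl (pvBTab (PySem.Set.ofList ng)) (PySem.Set.empty, PySem.Dict.empty)).2).getD x 0
        = pvExt cg_edges ng x := by
      intro x hx
      rw [pvBTab_fold_getD ng cg_edges PySem.Set.empty PySem.Dict.empty x hx]
      simp
    have hz := pvZip cg_edges ng _ _ hHI' hEC' ng (fun y hy => hy) [] 0 PySem.Set.empty
      (by intro y hy; simp at hy)
      (by intro x; rw [pvSContains_eq]; simp [PySem.Set.empty])
    simpa using hz

-- ===== VERDICT (by name: the statement is the Claim_ definition above) =====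
theorem find_in_nodes_spec : Claim_equal_find_in_nodes := by
  intro cg_edges ng _ _
  unfold Spec_find_in_nodes
  exact pvMain cg_edges ng
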